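-- pv_equiv track=rewrite | github.com/paiml/depyler | examples/hard_sec_merkle_tree.py | build_tree
-- ===== SOURCE A (Python) =====
-- from typing import List, Tuple
--
-- def hash_pair(a: int, b: int) -> int:
--     combined: int = ((a * 31) ^ (b * 37)) & 0xFFFFFFFF
--     combined = ((combined >> 16) ^ combined) * 0x45D9F3B
--     return combined & 0xFFFFFFFF
--
-- def hash_leaf(data: int) -> int:
--     return ((data * 0x5BD1E995) ^ (data >> 15)) & 0xFFFFFFFF
--
-- def build_tree(leaves: List[int]) -> List[int]:
--     n: int = len(leaves)
--     if n == 0: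
--         return [0]
--     size: int = 1
--     while size < n:
--         size = size * 2
--     tree: List[int] = [0] * (2 * size)
--     for i in range(n):
--         tree[size + i] = hash_leaf(leaves[i])
--     idx: int = size - 1
--     while idx >= 1:
--         tree[idx] = hash_pair(tree[2 * idx], tree[2 * idx + 1])
--         idx = idx - 1
--     return tree
-- ===== SOURCE B (Python) =====
-- from typing import List
--
-- def hash_pair(a: int, b: int) -> int:
--     combined: int = ((a * 31) ^ (b * 37)) & 0xFFFFFFFF
--     combined = ((combined >> 16) ^ combined) * 0x45D9F3B
--     return combined & 0xFFFFFFFF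
--
-- def hash_leaf(data: int) -> int:
--     return ((data * 0x5BD1E995) ^ (data >> 15)) & 0xFFFFFFFF
--
-- def build_tree(leaves: List[int]) -> List[int]:
--     # Recursive post-order (DFS) construction instead of A's descending-index loop.
--     n: int = len(leaves)
--     if n == 0:
--         return [0]
--     size: int = 1
--     while size < n:
--         size = size * 2
--     tree: List[int] = [0] * (2 * size)
--     for i in range(n):
--         tree[size + i] = hash_leaf(leaves[i])
--
--     def build(idx: int) -> int:
--         if idx >= size:
--             return tree[idx]
--         left = build(2 * idx)
--         right = build(2 * idx + 1)
--         tree[idx] = hash_pair(left, right)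
--         return tree[idx]
--
--     build(1)
--     return tree
-- ===== Notes on version B (the rewrite author's own statement) =====
-- stated objective: alternative
-- what changed: The bottom-up descending-index while loop that fills internal nodes is replaced by a recursive post-order DFS build(idx) that computes children before storing each parent; guard, size computation and array layout are unchanged.
import Mathlib
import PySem

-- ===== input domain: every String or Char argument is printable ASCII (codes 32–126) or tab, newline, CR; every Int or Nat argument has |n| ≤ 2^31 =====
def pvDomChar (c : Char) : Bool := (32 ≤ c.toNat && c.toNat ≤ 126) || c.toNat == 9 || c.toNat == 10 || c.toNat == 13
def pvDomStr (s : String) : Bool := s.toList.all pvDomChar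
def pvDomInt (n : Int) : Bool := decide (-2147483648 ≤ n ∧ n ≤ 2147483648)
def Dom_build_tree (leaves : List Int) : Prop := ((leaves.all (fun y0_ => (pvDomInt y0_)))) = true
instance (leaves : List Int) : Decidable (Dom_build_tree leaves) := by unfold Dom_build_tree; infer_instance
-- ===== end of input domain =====

-- B replaces A's descending-index filling loop by a recursive post-order DFS; same array layout, same values.

-- ===== PORT A =====
-- shared helpers (identical source code in both Pythons)
def hashPair (a b : Int) : Int :=
  let c := PySem.Int.band (PySem.Int.bxor (a * 31) (b * 37)) 0xFFFFFFFF
  let c2 := (PySem.Int.bxor (c >>> 16) c) * 0x45D9F3B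
  PySem.Int.band c2 0xFFFFFFFF

def hashLeaf (d : Int) : Int :=
  PySem.Int.band (PySem.Int.bxor (d * 0x5BD1E995) (d >>> 15)) 0xFFFFFFFF

-- "while size < n: size = size * 2"
def sizeLoop (n size : Nat) : Nat :=
  if 0 < size ∧ size < n then sizeLoop n (size * 2) else size
termination_by n - size
decreasing_by omega

-- "for i in range(n): tree[size + i] = hash_leaf(leaves[i])"
def placeLeaves (leaves : List Int) (size : Nat) (tree : List Int) : List Int :=
  (List.range leaves.length).foldl (fun t i => t.set (size + i) (hashLeaf (leaves.getD i 0))) tree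

-- "idx = size - 1; while idx >= 1: tree[idx] = hash_pair(tree[2*idx], tree[2*idx+1]); idx -= 1"
def downLoop (tree : List Int) (idx : Nat) : List Int :=
  if 1 ≤ idx then
    downLoop (tree.set idx (hashPair (tree.getD (2 * idx) 0) (tree.getD (2 * idx + 1) 0))) (idx - 1)
  else tree

def build_tree (leaves : List Int) : List Int :=
  let n := leaves.length
  if n = 0 then [0]
  else
    let size := sizeLoop n 1
    let tree := placeLeaves leaves size (List.replicate (2 * size) 0)
    downLoop tree (size - 1)

-- ===== PORT B =====
-- "def build(idx): if idx >= size: return tree[idx]; l = build(2*idx); r = build(2*idx+1); tree[idx] = hash_pair(l, r); return tree[idx]"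
def buildRec (size idx : Nat) (tree : List Int) : List Int × Int :=
  if idx = 0 then (tree, 0) -- totality guard; build_tree_alt only calls idx ≥ 1, as B's Python build does
  else if size ≤ idx then (tree, tree.getD idx 0)
  else
    let r1 := buildRec size (2 * idx) tree
    let r2 := buildRec size (2 * idx + 1) r1.1
    let v := hashPair r1.2 r2.2
    (r2.1.set idx v, v)
termination_by size - idx
decreasing_by all_goals omega

def build_tree_alt (leaves : List Int) : List Int :=
  let n := leaves.length
  if n = 0 then [0]
  else
    let size := sizeLoop n 1
    let tree := placeLeaves leaves size (List.replicate (2 * size) 0)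
    (buildRec size 1 tree).1

-- ===== PRECONDITION & SPEC =====
def Spec_build_tree (leaves : List Int) (out : List Int) : Prop := out = build_tree_alt leaves
instance (leaves : List Int) (out : List Int) : Decidable (Spec_build_tree leaves out) := by unfold Spec_build_tree; infer_instance

-- ===== CLAIM (what is proved, stated in full; the proofs are below) =====
def Claim_equal_build_tree : Prop := ∀ (leaves : List Int), Dom_build_tree leaves → Spec_build_tree leaves (build_tree leaves)

-- ===== LEMMAS AND PROOFS =====

-- the intended value of node j over leaf layer t0 (proof-only reference function)
def nodeVal (s : Nat) (t0 : List Int) (j : Nat) : Int :=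
  if j = 0 then 0
  else if s ≤ j then t0.getD j 0
  else hashPair (nodeVal s t0 (2 * j)) (nodeVal s t0 (2 * j + 1))
termination_by s - j
decreasing_by all_goals omega

-- j is in the subtree rooted at i (binary-heap indexing)
def Desc (i j : Nat) : Prop := ∃ p, i * 2 ^ p ≤ j ∧ j < (i + 1) * 2 ^ p

theorem desc_self (i : Nat) : Desc i i := ⟨0, by simp⟩

theorem desc_left {i j : Nat} (h : Desc (2 * i) j) : Desc i j := by
  obtain ⟨p, h1, h2⟩ := h
  have he : 0 < (2:Nat) ^ p := Nat.two_pow_pos p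
  have hp : (2:Nat) ^ (p + 1) = 2 * 2 ^ p := by rw [pow_succ]; ring
  exact ⟨p + 1, by rw [hp]; linarith, by rw [hp]; linarith⟩

theorem desc_right {i j : Nat} (h : Desc (2 * i + 1) j) : Desc i j := by
  obtain ⟨p, h1, h2⟩ := h
  have he : 0 < (2:Nat) ^ p := Nat.two_pow_pos p
  have hp : (2:Nat) ^ (p + 1) = 2 * 2 ^ p := by rw [pow_succ]; ring
  exact ⟨p + 1, by rw [hp]; linarith, by rw [hp]; linarith⟩

theorem desc_split {i j : Nat} (h : Desc i j) :
    j = i ∨ Desc (2 * i) j ∨ Desc (2 * i + 1) j := by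
  obtain ⟨p, h1, h2⟩ := h
  cases p with
  | zero => left; simp only [pow_zero, mul_one] at h1 h2; omega
  | succ q =>
    right
    have he : 0 < (2:Nat) ^ q := Nat.two_pow_pos q
    have hq : (2:Nat) ^ (q + 1) = 2 * 2 ^ q := by rw [pow_succ]; ring
    rw [hq] at h1 h2
    by_cases hm : j < (2 * i + 1) * 2 ^ q
    · left; exact ⟨q, by linarith, hm⟩
    · right; exact ⟨q, by linarith [Nat.not_lt.mp hm], by linarith⟩

theorem desc_ge {i j : Nat} (h : Desc i j) : i ≤ j := by
  obtain ⟨p, h1, _⟩ := h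
  have := Nat.one_le_two_pow (n := p)
  nlinarith

theorem desc_one {j : Nat} (h : 1 ≤ j) : Desc 1 j := by
  refine ⟨Nat.log 2 j, by simpa using Nat.pow_log_le_self 2 (by omega), ?_⟩
  have := Nat.lt_pow_succ_log_self (by norm_num : 1 < 2) j
  have hq : (2:Nat) ^ (Nat.log 2 j + 1) = 2 * 2 ^ (Nat.log 2 j) := by rw [pow_succ]; ring
  rw [hq] at this
  linarith

theorem getD_set (t : List Int) (i j : Nat) (v : Int) :
    (t.set i v).getD j 0 = if i = j ∧ i < t.length then v else t.getD j 0 := by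
  split_ifs with h
  · obtain ⟨rfl, hl⟩ := h
    simp [List.getD, List.getElem?_set_self (by omega)]
  · by_cases hij : i = j
    · subst hij
      have : ¬ i < t.length := by tauto
      simp [List.getD, this]
    · simp [List.getD, hij]

theorem buildRec_spec (s : Nat) (t0 : List Int) :
    ∀ (m i : Nat), 1 ≤ i → s - i ≤ m → ∀ (t : List Int),
    s ≤ t.length →
    (∀ j, s ≤ j → t.getD j 0 = t0.getD j 0) →
    (buildRec s i t).1.length = t.length ∧
    (buildRec s i t).2 = nodeVal s t0 i ∧
    (∀ j, Desc i j → j < s → (buildRec s i t).1.getD j 0 = nodeVal s t0 j) ∧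
    (∀ j, ¬ (Desc i j ∧ j < s) → (buildRec s i t).1.getD j 0 = t.getD j 0) := by
  intro m
  induction m with
  | zero =>
    intro i hi hm t hlen hleaf
    have hs : s ≤ i := by omega
    rw [buildRec, if_neg (by omega : ¬ i = 0), if_pos hs]
    refine ⟨rfl, ?_, ?_, fun j _ => rfl⟩
    · rw [nodeVal, if_neg (by omega : ¬ i = 0), if_pos hs]
      exact hleaf i hs
    · intro j hd hjs
      have := desc_ge hd
      omega
  | succ k ih =>
    intro i hi hm t hlen hleaf
    by_cases hs : s ≤ i
    · rw [buildRec, if_neg (by omega : ¬ i = 0), if_pos hs]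
      refine ⟨rfl, ?_, ?_, fun j _ => rfl⟩
      · rw [nodeVal, if_neg (by omega : ¬ i = 0), if_pos hs]
        exact hleaf i hs
      · intro j hd hjs
        have := desc_ge hd
        omega
    · obtain ⟨len1, val1, pos1, neg1⟩ :=
        ih (2 * i) (by omega) (by omega) t hlen hleaf
      set t1 := (buildRec s (2 * i) t).1 with ht1
      have hleaf1 : ∀ j, s ≤ j → t1.getD j 0 = t0.getD j 0 := by
        intro j hj
        rw [neg1 j (by rintro ⟨_, hlt⟩; omega)]
        exact hleaf j hj
      obtain ⟨len2, val2, pos2, neg2⟩ :=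
        ih (2 * i + 1) (by omega) (by omega) t1 (by omega) hleaf1
      set t2 := (buildRec s (2 * i + 1) t1).1 with ht2
      rw [buildRec, if_neg (by omega : ¬ i = 0), if_neg hs]
      dsimp only
      rw [← ht1, ← ht2]
      have hnv : nodeVal s t0 i = hashPair (nodeVal s t0 (2 * i)) (nodeVal s t0 (2 * i + 1)) := by
        rw [nodeVal, if_neg (by omega : ¬ i = 0), if_neg hs]
      have hlen2 : t2.length = t.length := by rw [len2, len1]
      refine ⟨by simp [List.length_set, hlen2], by rw [val1, val2, hnv], ?_, ?_⟩
      · intro j hd hjs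
        rw [getD_set]
        by_cases hji : i = j
        · rw [if_pos ⟨hji, by omega⟩, val1, val2, ← hji]
          exact hnv.symm
        · rw [if_neg (by tauto)]
          rcases desc_split hd with h | h | h
          · exact absurd h.symm hji
          · rw [neg2 j ?_, pos1 j h hjs]
            rintro ⟨hd2, _⟩
            obtain ⟨p, a1, a2⟩ := h
            obtain ⟨q, b1, b2⟩ := hd2
            rcases Nat.lt_or_ge q p with hlt | hge
            · have h2 : 2 * 2 ^ q ≤ 2 ^ p := by
                have : (2:Nat) ^ (q + 1) ≤ 2 ^ p := Nat.pow_le_pow_right (by omega) hlt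
                rw [pow_succ] at this; omega
              have h3 : 2 * i * (2 * 2 ^ q) ≤ 2 * i * 2 ^ p := Nat.mul_le_mul_left _ h2
              have h4 : (2 * i + 2) * 2 ^ q ≤ 4 * i * 2 ^ q :=
                Nat.mul_le_mul_right _ (by omega)
              linarith
            · have h5 : (2 * i + 1) * 2 ^ p ≤ (2 * i + 1) * 2 ^ q :=
                Nat.mul_le_mul_left _ (Nat.pow_le_pow_right (by omega) hge)
              linarith
          · exact pos2 j h hjs
      · intro j hnd
        rw [getD_set, if_neg (by rintro ⟨he, _⟩; exact hnd ⟨he ▸ desc_self i, by omega⟩),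
          neg2 j (by rintro ⟨hd, hlt⟩; exact hnd ⟨desc_right hd, hlt⟩),
          neg1 j (by rintro ⟨hd, hlt⟩; exact hnd ⟨desc_left hd, hlt⟩)]

theorem downLoop_spec (s : Nat) (t0 : List Int) :
    ∀ (idx : Nat) (t : List Int),
    idx < s → t.length = 2 * s →
    (∀ j, idx < j → j < s → t.getD j 0 = nodeVal s t0 j) →
    (∀ j, s ≤ j → t.getD j 0 = t0.getD j 0) →
    (downLoop t idx).length = t.length ∧
    (∀ j, (downLoop t idx).getD j 0 =
      if 1 ≤ j ∧ j < s then nodeVal s t0 j else t.getD j 0) := by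
  intro idx
  induction idx with
  | zero =>
    intro t hidx hlen hinv hleaf
    rw [downLoop, if_neg (by omega : ¬ 1 ≤ 0)]
    refine ⟨rfl, fun j => ?_⟩
    split_ifs with h
    · exact hinv j (by omega) h.2
    · rfl
  | succ k ih =>
    intro t hidx hlen hinv hleaf
    rw [downLoop, if_pos (by omega : 1 ≤ k + 1)]
    simp only [Nat.add_sub_cancel]
    set v := hashPair (t.getD (2 * (k + 1)) 0) (t.getD (2 * (k + 1) + 1) 0) with hv
    set t' := t.set (k + 1) v with ht'
    have hvd : v = nodeVal s t0 (k + 1) := by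
      have hc : ∀ c : Nat, k + 1 < c → t.getD c 0 = nodeVal s t0 c := by
        intro c hcgt
        by_cases hcs : c < s
        · exact hinv c hcgt hcs
        · rw [hleaf c (by omega), nodeVal,
            if_neg (by omega : ¬ c = 0), if_pos (by omega : s ≤ c)]
      have hnv : nodeVal s t0 (k + 1) =
          hashPair (nodeVal s t0 (2 * (k + 1))) (nodeVal s t0 (2 * (k + 1) + 1)) := by
        rw [nodeVal, if_neg (by omega : ¬ k + 1 = 0), if_neg (by omega : ¬ s ≤ k + 1)]
      rw [hv, hc (2 * (k + 1)) (by omega), hc (2 * (k + 1) + 1) (by omega)]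
      exact hnv.symm
    have hlen' : t'.length = 2 * s := by simp [ht', List.length_set, hlen]
    have hget' : ∀ j, t'.getD j 0 =
        if k + 1 = j ∧ k + 1 < t.length then v else t.getD j 0 := fun j => getD_set t (k + 1) j v
    obtain ⟨dl, dg⟩ := ih t' (by omega) hlen'
      (by
        intro j hj hjs
        rw [hget']
        by_cases hje : k + 1 = j
        · rw [if_pos ⟨hje, by omega⟩, hvd, hje]
        · rw [if_neg (by tauto)]; exact hinv j (by omega) hjs)
      (by
        intro j hj
        rw [hget', if_neg (by rintro ⟨he, _⟩; omega)]
        exact hleaf j hj)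
    refine ⟨by rw [dl, hlen', hlen], fun j => ?_⟩
    rw [dg j, hget']
    by_cases hj : 1 ≤ j ∧ j < s
    · rw [if_pos hj, if_pos hj]
    · rw [if_neg hj, if_neg hj, if_neg (by rintro ⟨he, _⟩; exact hj ⟨by omega, by omega⟩)]

theorem placeLeaves_length (leaves : List Int) (size : Nat) (tree : List Int) :
    (placeLeaves leaves size tree).length = tree.length := by
  unfold placeLeaves
  generalize List.range leaves.length = l
  induction l generalizing tree with
  | nil => rfl
  | cons x xs ih => simp only [List.foldl_cons]; rw [ih, List.length_set]

theorem sizeLoop_pos (n : Nat) : ∀ (size : Nat), 0 < size → 0 < sizeLoop n size := by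
  intro size h
  induction size using sizeLoop.induct n with
  | case1 size hlt ih => rw [sizeLoop, if_pos hlt]; exact ih (by omega)
  | case2 size hlt => rw [sizeLoop, if_neg hlt]; exact h

theorem getD_ext {t1 t2 : List Int} (hlen : t1.length = t2.length)
    (h : ∀ j, t1.getD j 0 = t2.getD j 0) : t1 = t2 := by
  apply List.ext_getElem hlen
  intro i h1 h2
  have := h i
  rwa [List.getD_eq_getElem t1 0 h1, List.getD_eq_getElem t2 0 h2] at this

-- ===== VERDICT (by name: the statement is the Claim_ definition above) =====
theorem build_tree_spec : Claim_equal_build_tree := by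
  intro leaves _
  unfold Spec_build_tree build_tree build_tree_alt
  by_cases hn : leaves.length = 0
  · simp [hn]
  · simp only [hn, if_neg, if_false]
    set s := sizeLoop leaves.length 1 with hsdef
    have hs : 0 < s := sizeLoop_pos leaves.length 1 (by omega)
    set t0 := placeLeaves leaves s (List.replicate (2 * s) 0) with ht0
    have hlen0 : t0.length = 2 * s := by
      rw [ht0, placeLeaves_length, List.length_replicate]
    obtain ⟨alen, ag⟩ := downLoop_spec s t0 (s - 1) t0 (by omega) hlen0
      (by intro j h1 h2; omega) (by intro j _; rfl)
    obtain ⟨blen, bval, bpos, bneg⟩ := buildRec_spec s t0 (s - 1) 1 (by omega) (by omega) t0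
      (by omega) (fun j _ => rfl)
    apply getD_ext (by rw [alen, blen])
    intro j
    rw [ag j]
    by_cases hj : 1 ≤ j ∧ j < s
    · rw [if_pos hj, bpos j (desc_one hj.1) hj.2]
    · rw [if_neg hj, bneg j (by rintro ⟨hd, hlt⟩; exact hj ⟨desc_ge hd, hlt⟩)]
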